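-- pv_equiv track=rewrite | github.com/rolan2kn/aaai2024_etd_src | utilities/persistence_diagram_helper.py | get_maximum_sizes
-- ===== SOURCE A (Python) =====
-- def get_maximum_sizes(iid_PD):
--     max_sizes = {}
--     for diag in iid_PD:
--         for d, hg in enumerate(diag):
--             hgcard = len(hg)
--             if d not in max_sizes: # missing dimension
--                 max_sizes.update({d: hgcard})
--             if max_sizes[d] < hgcard:
--                 max_sizes[d] = hgcard
--     return max_sizes
-- ===== SOURCE B (Python) =====
-- def get_maximum_sizes(iid_PD):
--     # Pass 1: group all homology-group cardinalities by dimension.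
--     table = {}
--     for diag in iid_PD:
--         for d, hg in enumerate(diag):
--             table.setdefault(d, []).append(len(hg))
--     # Pass 2: reduce each dimension's list of cardinalities to its maximum.
--     return {d: max(cards) for d, cards in table.items()}
-- ===== Notes on version B (the rewrite author's own statement) =====
-- stated objective: alternative
-- what changed: Replaces the streaming running-max dict with a two-pass group-then-reduce: first collect all cardinalities per dimension into a dict of lists, then build the result by taking max() of each list.
import Mathlib
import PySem

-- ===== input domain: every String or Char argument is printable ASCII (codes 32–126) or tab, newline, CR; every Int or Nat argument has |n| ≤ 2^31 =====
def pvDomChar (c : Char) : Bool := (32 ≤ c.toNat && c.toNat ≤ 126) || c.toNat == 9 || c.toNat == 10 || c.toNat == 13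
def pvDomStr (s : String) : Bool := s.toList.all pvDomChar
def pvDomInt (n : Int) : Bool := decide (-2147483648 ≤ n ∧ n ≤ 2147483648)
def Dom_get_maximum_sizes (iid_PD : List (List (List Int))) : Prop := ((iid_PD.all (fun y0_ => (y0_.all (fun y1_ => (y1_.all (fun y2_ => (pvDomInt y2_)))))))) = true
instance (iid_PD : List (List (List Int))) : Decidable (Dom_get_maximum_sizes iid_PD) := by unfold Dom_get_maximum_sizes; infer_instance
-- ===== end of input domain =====

-- B replaces A's streaming running-max dict with a two-pass group-then-reduce (collect all
-- cardinalities per dimension, then take the max of each list); alternative, not faster.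

-- ===== PORT A =====
-- one iteration of A's inner loop body, state = the max_sizes dict
def pvStepA (ms : PySem.Dict Int Int) (p : Int × List Int) : PySem.Dict Int Int :=
  let hgcard : Int := p.2.length
  let ms1 := if ms.contains p.1 then ms else ms.insert p.1 hgcard   -- if d not in max_sizes: max_sizes.update({d: hgcard})
  -- max_sizes[d]: d is always present at this point, so getD 0 is exact
  if ms1.getD p.1 0 < hgcard then ms1.insert p.1 hgcard else ms1

def get_maximum_sizes (iid_PD : List (List (List Int))) : List (Int × Int) :=
  (iid_PD.foldl (fun ms diag => (PySem.List.enumerate diag 0).foldl pvStepA ms) PySem.Dict.empty).items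

-- ===== PORT B =====
-- pass 1 body: table.setdefault(d, []).append(len(hg))
def pvStepB (t : PySem.Dict Int (List Int)) (p : Int × List Int) : PySem.Dict Int (List Int) :=
  t.modify p.1 [] (· ++ [(p.2.length : Int)])

def get_maximum_sizes_alt (iid_PD : List (List (List Int))) : List (Int × Int) :=
  -- pass 1: build the table; pass 2: {d: max(cards) for d, cards in table.items()}
  -- (cards is never empty, so max? …|>.getD 0 is exact for Python's max(cards))
  (iid_PD.foldl (fun t diag => (PySem.List.enumerate diag 0).foldl pvStepB t) PySem.Dict.empty).items.map
    (fun p => (p.1, (PySem.List.max? p.2 (fun x => x)).getD 0))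

-- ===== PRECONDITION & SPEC =====
def Spec_get_maximum_sizes (iid_PD : List (List (List Int))) (out : List (Int × Int)) : Prop := out = get_maximum_sizes_alt iid_PD
instance (iid_PD : List (List (List Int))) (out : List (Int × Int)) : Decidable (Spec_get_maximum_sizes iid_PD out) := by unfold Spec_get_maximum_sizes; infer_instance

-- ===== CLAIM (what is proved, stated in full; the proofs are below) =====
def Claim_equal_get_maximum_sizes : Prop := ∀ (iid_PD : List (List (List Int))), Dom_get_maximum_sizes iid_PD → Spec_get_maximum_sizes iid_PD (get_maximum_sizes iid_PD)

-- ===== LEMMAS AND PROOFS =====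

-- invariant linking the two accumulators
def pvInv (a : PySem.Dict Int Int) (b : PySem.Dict Int (List Int)) : Prop :=
  a.keys = b.keys ∧ b.keys.Nodup ∧
  ∀ k, k ∈ b.keys → PySem.List.max? (b.getD k []) (fun x => x) = some (a.getD k 0)

theorem pv_max_append (l : List Int) (v c : Int)
    (h : PySem.List.max? l (fun x => x) = some v) :
    PySem.List.max? (l ++ [c]) (fun x => x) = some (max v c) := by
  cases l with
  | nil => simp [PySem.List.max?] at h
  | cons x t =>
    rw [PySem.List.max?_id_cons] at h
    have hv : t.foldl max x = v := Option.some.inj h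
    rw [List.cons_append, PySem.List.max?_id_cons, List.foldl_append, hv]
    simp

theorem pvInv_step (a : PySem.Dict Int Int) (b : PySem.Dict Int (List Int))
    (p : Int × List Int) (h : pvInv a b) : pvInv (pvStepA a p) (pvStepB b p) := by
  obtain ⟨hk, hnd, hv⟩ := h
  set c : Int := (p.2.length : Int) with hcdef
  by_cases hc : b.contains p.1
  · -- key already present: A keeps keys, maybe bumps the value; B appends to the list
    have hmem : p.1 ∈ b.keys := (PySem.Dict.contains_iff_mem_keys b p.1).1 hc
    have hac : a.contains p.1 = true := (PySem.Dict.contains_iff_mem_keys a p.1).2 (hk ▸ hmem)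
    have hva := hv p.1 hmem
    set v : Int := a.getD p.1 0 with hvdef
    have hA : pvStepA a p = if v < c then a.insert p.1 c else a := by
      simp [pvStepA, hac, ← hcdef, ← hvdef]
    have hkA : (pvStepA a p).keys = a.keys := by
      rw [hA]; split
      · exact PySem.Dict.keys_insert_of_contains a c hac
      · rfl
    have hvA : (pvStepA a p).getD p.1 0 = max v c := by
      rw [hA]; split
      · rw [PySem.Dict.getD_insert_self]; omega
      · rw [← hvdef]; omega
    have hvA' : ∀ k, k ≠ p.1 → (pvStepA a p).getD k 0 = a.getD k 0 := by
      intro k hne; rw [hA]; split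
      · exact PySem.Dict.getD_insert_of_ne a c 0 hne
      · rfl
    have hkB : (pvStepB b p).keys = b.keys := by
      rw [pvStepB, PySem.Dict.keys_modify]
      exact PySem.Dict.keys_insert_of_contains b _ hc
    refine ⟨by rw [hkA, hkB, hk], by rw [hkB]; exact hnd, ?_⟩
    intro k hkmem
    rw [hkB] at hkmem
    by_cases hke : k = p.1
    · rw [hke, pvStepB, PySem.Dict.getD_modify_self, hvA,
          pv_max_append (b.getD p.1 []) v c hva]
    · rw [pvStepB, PySem.Dict.getD_modify, if_neg hke, hvA' k hke, hv k hkmem]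
  · -- fresh key: both append it; A stores c, B stores [c]
    have hbc : b.contains p.1 = false := by simpa using hc
    have hnmem : p.1 ∉ b.keys := fun hm => hc ((PySem.Dict.contains_iff_mem_keys b p.1).2 hm)
    have hac : a.contains p.1 = false := by
      by_contra hca
      exact hnmem (hk ▸ (PySem.Dict.contains_iff_mem_keys a p.1).1 (by simpa using hca))
    have hA : pvStepA a p = a.insert p.1 c := by
      simp [pvStepA, hac, ← hcdef, PySem.Dict.getD_insert_self]
    have hkB : (pvStepB b p).keys = b.keys ++ [p.1] := by
      rw [pvStepB, PySem.Dict.keys_modify]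
      exact PySem.Dict.keys_insert_of_not_contains b _ hbc
    refine ⟨?_, ?_, ?_⟩
    · rw [hA, PySem.Dict.keys_insert_of_not_contains a c hac, hkB, hk]
    · rw [hkB, List.nodup_append]
      refine ⟨hnd, List.nodup_singleton _, ?_⟩
      intro x hx y hy
      simp at hy
      subst hy
      exact fun h => hnmem (h ▸ hx)
    · intro k hkmem
      by_cases hke : k = p.1
      · rw [hke, pvStepB, PySem.Dict.getD_modify_self,
            PySem.Dict.getD_of_not_contains b [] hbc, hA, PySem.Dict.getD_insert_self]
        simpa using PySem.List.max?_id_cons c []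
      · have hkb : k ∈ b.keys := by
          rw [hkB] at hkmem
          simpa [hke] using hkmem
        rw [pvStepB, PySem.Dict.getD_modify, if_neg hke, hA,
            PySem.Dict.getD_insert_of_ne a c 0 hke, hv k hkb]

theorem pvInv_foldl (ps : List (Int × List Int)) (a : PySem.Dict Int Int)
    (b : PySem.Dict Int (List Int)) (h : pvInv a b) :
    pvInv (ps.foldl pvStepA a) (ps.foldl pvStepB b) := by
  induction ps generalizing a b with
  | nil => exact h
  | cons p t ih => exact ih _ _ (pvInv_step a b p h)

theorem pv_items_of_inv (a : PySem.Dict Int Int) (b : PySem.Dict Int (List Int))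
    (h : pvInv a b) :
    a.items = b.items.map (fun p => (p.1, (PySem.List.max? p.2 (fun x => x)).getD 0)) := by
  obtain ⟨hk, hnd, hv⟩ := h
  rw [PySem.Dict.items_eq_map_keys a (hk ▸ hnd) 0,
      PySem.Dict.items_eq_map_keys b hnd [], List.map_map, hk]
  apply List.map_congr_left
  intro k hkmem
  simp [hv k hkmem]

-- fuse the two nested loops into a single fold over the concatenated enumerations
theorem pv_double {α : Type} (L : List (List (List Int))) (f : α → Int × List Int → α) (init : α) :
    L.foldl (fun s diag => (PySem.List.enumerate diag 0).foldl f s) init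
      = ((L.map (fun diag => PySem.List.enumerate diag 0)).flatten).foldl f init := by
  induction L generalizing init with
  | nil => rfl
  | cons d t ih => simp only [List.foldl_cons, List.map_cons, List.flatten_cons,
                              List.foldl_append, ih]

-- ===== VERDICT (by name: the statement is the Claim_ definition above) =====
theorem get_maximum_sizes_spec : Claim_equal_get_maximum_sizes := by
  intro iid_PD _
  unfold Spec_get_maximum_sizes get_maximum_sizes get_maximum_sizes_alt
  rw [pv_double iid_PD pvStepA, pv_double iid_PD pvStepB]
  exact pv_items_of_inv _ _ (pvInv_foldl _ _ _ ⟨rfl, List.nodup_nil, by simp⟩)
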